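-- pv_equiv track=rewrite | github.com/Prajjwal98Dubey/DSA-Algorithms | DP/PartitionDp.py | partitionSum
-- ===== SOURCE A (Python) =====
-- def partitionSum(arr,k):
--     dp={}
--     def dfs(index):
--         if index==len(arr):
--             return 0
--         if index in dp:
--             return dp[index]
--         maxi=-1
--         res=-1
--         for i in range(index,len(arr)):
--             if i < index+k:
--                 maxi=max(maxi,arr[i])
--                 res=max(res,(i-index+1)*maxi + dfs(i+1))
--         dp[index] = res
--         return res
--     return dfs(0)
-- ===== SOURCE B (Python) =====
-- def partitionSum(arr, k):
--     # Bottom-up tabulation of the same recurrence (no recursion, no memo dict).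
--     n = len(arr)
--     dp = [0] * (n + 1)
--     for index in range(n - 1, -1, -1):
--         maxi = -1
--         res = -1
--         for i in range(index, min(index + k, n)):
--             maxi = max(maxi, arr[i])
--             res = max(res, (i - index + 1) * maxi + dp[i + 1])
--         dp[index] = res
--     return dp[0]
-- ===== Notes on version B (the rewrite author's own statement) =====
-- stated objective: alternative
-- what changed: Replaced the memoized top-down recursion (dict cache, inner scan over the whole suffix with an if-guard) by an iterative bottom-up table filled from the right, with the inner loop bounded directly by min(index+k, n).
import Mathlib
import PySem

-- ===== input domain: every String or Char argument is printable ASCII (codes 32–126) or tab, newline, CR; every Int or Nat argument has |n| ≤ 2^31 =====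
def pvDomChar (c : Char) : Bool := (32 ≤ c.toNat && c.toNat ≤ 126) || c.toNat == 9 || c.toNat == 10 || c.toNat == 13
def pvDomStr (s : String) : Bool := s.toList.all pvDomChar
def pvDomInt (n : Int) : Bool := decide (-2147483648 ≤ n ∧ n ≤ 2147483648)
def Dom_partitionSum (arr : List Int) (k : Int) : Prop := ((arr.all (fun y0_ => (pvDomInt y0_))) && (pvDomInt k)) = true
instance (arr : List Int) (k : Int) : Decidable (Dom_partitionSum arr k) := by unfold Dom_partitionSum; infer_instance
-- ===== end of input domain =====

-- B replaces A's memoized top-down recursion by an iterative bottom-up table; return values agree on all inputs.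

-- ===== PORT A =====
-- A's memoized dfs: the memo dict is threaded through; recursion is made total with
-- a fuel parameter (fuel = len(arr)+1 always suffices, the measure is len(arr)-index).
mutual
def dfsA (arr : List Int) (k : Int) : Nat → Nat → PySem.Dict Int Int → Int × PySem.Dict Int Int
  | 0, _, dp => (0, dp)          -- fuel exhausted; unreachable with fuel > len(arr) - index
  | fuel + 1, index, dp =>
    if index = arr.length then (0, dp)
    else
      match PySem.Dict.get? dp (index : Int) with
      | some v => (v, dp)
      | none =>
        let t := loopA arr k fuel index (List.range' index (arr.length - index)) (-1) (-1) dp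
        (t.2.1, PySem.Dict.insert t.2.2 (index : Int) t.2.1)
termination_by fuel _ _ => (fuel, 0)

-- the `for i in range(index, len(arr))` loop of dfs, state (maxi, res, dp)
def loopA (arr : List Int) (k : Int) : Nat → Nat → List Nat → Int → Int → PySem.Dict Int Int → Int × Int × PySem.Dict Int Int
  | _, _, [], maxi, res, dp => (maxi, res, dp)
  | fuel, index, i :: rest, maxi, res, dp =>
    if (i : Int) < (index : Int) + k then
      let maxi' := max maxi (arr.getD i 0)    -- arr[i], i always in range here
      let r := dfsA arr k fuel (i + 1) dp
      let res' := max res (((i : Int) - (index : Int) + 1) * maxi' + r.1)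
      loopA arr k fuel index rest maxi' res' r.2
    else loopA arr k fuel index rest maxi res dp
termination_by fuel _ l _ _ _ => (fuel, l.length + 1)
end

def partitionSum (arr : List Int) (k : Int) : Int :=
  (dfsA arr k (arr.length + 1) 0 PySem.Dict.empty).1

-- ===== PORT B =====
-- length of Python's range(index, min(index+k, n))
def pvMB (arr : List Int) (k : Int) (index : Nat) : Nat :=
  (min ((index : Int) + k) (arr.length : Int) - (index : Int)).toNat

-- one inner loop of Source B; tbl holds dp[index+1..n], so dp[i+1] = tbl[i-index]
def rowB (arr : List Int) (k : Int) (index : Nat) (tbl : List Int) : Int :=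
  ((List.range' index (pvMB arr k index)).foldl
    (fun (p : Int × Int) i =>
      let maxi := max p.1 (arr.getD i 0)      -- arr[i], i always in range here
      (maxi, max p.2 (((i : Int) - (index : Int) + 1) * maxi + tbl.getD (i - index) 0)))
    (-1, -1)).2

def partitionSum_alt (arr : List Int) (k : Int) : Int :=
  ((List.range arr.length).foldr (fun index tbl => rowB arr k index tbl :: tbl) [0]).headD 0

-- ===== PRECONDITION & SPEC =====
def Spec_partitionSum (arr : List Int) (k : Int) (out : Int) : Prop := out = partitionSum_alt arr k
instance (arr : List Int) (k : Int) (out : Int) : Decidable (Spec_partitionSum arr k out) := by unfold Spec_partitionSum; infer_instance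

-- ===== CLAIM (what is proved, stated in full; the proofs are below) =====
def Claim_equal_partitionSum : Prop := ∀ (arr : List Int) (k : Int), Dom_partitionSum arr k → Spec_partitionSum arr k (partitionSum arr k)

-- ===== LEMMAS AND PROOFS =====

-- the common shape of the inner-loop body, parametrized by where dp[i+1] comes from
def stepF (arr : List Int) (index : Nat) (g : Nat → Int) (p : Int × Int) (i : Nat) : Int × Int :=
  (max p.1 (arr.getD i 0),
   max p.2 (((i : Int) - (index : Nat) + 1) * max p.1 (arr.getD i 0) + g i))

-- the pure recurrence value, with fuel
def F (arr : List Int) (k : Int) : Nat → Nat → Int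
  | 0, _ => 0
  | fuel + 1, index =>
    if index = arr.length then 0
    else ((List.range' index (pvMB arr k index)).foldl
            (stepF arr index (fun i => F arr k fuel (i + 1))) (-1, -1)).2

lemma foldl_stepF_congr (arr : List Int) (index : Nat) (g h : Nat → Int) :
    ∀ (l : List Nat) (p : Int × Int), (∀ i ∈ l, g i = h i) →
      l.foldl (stepF arr index g) p = l.foldl (stepF arr index h) p := by
  intro l
  induction l with
  | nil => intro p _; rfl
  | cons a t ih =>
      intro p H
      simp only [List.foldl_cons]
      rw [show stepF arr index g p a = stepF arr index h p a by
            simp [stepF, H a (by simp)]]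
      exact ih _ (fun i hi => H i (by simp [hi]))

lemma mem_range'_bounds {s n i : Nat} (h : i ∈ List.range' s n) : s ≤ i ∧ i < s + n := by
  simpa using List.mem_range'_1.mp h

lemma pvMB_cast (arr : List Int) (k : Int) (index : Nat) :
    ((pvMB arr k index : Nat) : Int)
      = max 0 (min ((index : Int) + k) ((arr.length : Nat) : Int) - (index : Int)) := by
  unfold pvMB
  omega

lemma pvMB_le (arr : List Int) (k : Int) (index : Nat) (h : index ≤ arr.length) :
    pvMB arr k index ≤ arr.length - index := by
  unfold pvMB
  omega

lemma F_stab (arr : List Int) (k : Int) :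
    ∀ f1 f2 index, arr.length - index < f1 → arr.length - index < f2 →
      F arr k f1 index = F arr k f2 index := by
  intro f1
  induction f1 with
  | zero => intro f2 index h1 _; omega
  | succ a ih =>
      intro f2 index h1 h2
      cases f2 with
      | zero => omega
      | succ b =>
        simp only [F]
        split
        · rfl
        · rename_i hne
          apply congrArg
          apply foldl_stepF_congr
          intro i hi
          have hb := mem_range'_bounds hi
          have hm : pvMB arr k i ≤ arr.length := by unfold pvMB; omega
          have hilt : i < arr.length := by
            have : pvMB arr k index ≤ arr.length - index := by unfold pvMB; omega
            omega
          exact ih b (i + 1) (by omega) (by omega)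

-- canonical table value
def Fv (arr : List Int) (k : Int) (j : Nat) : Int := F arr k (arr.length + 1) j

lemma Fv_len (arr : List Int) (k : Int) : Fv arr k arr.length = 0 := by
  simp [Fv, F]

lemma Fv_succ_eq (arr : List Int) (k : Int) (i : Nat) (h : i < arr.length) :
    F arr k arr.length (i + 1) = Fv arr k (i + 1) :=
  F_stab arr k arr.length (arr.length + 1) (i + 1) (by omega) (by omega)

lemma Fv_lt (arr : List Int) (k : Int) (index : Nat) (h : index < arr.length) :
    Fv arr k index =
      ((List.range' index (pvMB arr k index)).foldl
        (stepF arr index (fun i => Fv arr k (i + 1))) (-1, -1)).2 := by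
  have : Fv arr k index =
      ((List.range' index (pvMB arr k index)).foldl
        (stepF arr index (fun i => F arr k arr.length (i + 1))) (-1, -1)).2 := by
    simp only [Fv, F]
    rw [if_neg (by omega)]
  rw [this]
  apply congrArg
  apply foldl_stepF_congr
  intro i hi
  have hb := mem_range'_bounds hi
  have hle := pvMB_le arr k index (by omega)
  exact Fv_succ_eq arr k i (by omega)

-- ---------- B side ----------

lemma rowB_eq (arr : List Int) (k : Int) (index : Nat) (tbl : List Int) :
    rowB arr k index tbl =
      ((List.range' index (pvMB arr k index)).foldl
        (stepF arr index (fun i => tbl.getD (i - index) 0)) (-1, -1)).2 := rfl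

lemma tableB (arr : List Int) (k : Int) :
    ∀ c index, index + c = arr.length →
      ((List.range' index c).foldr (fun idx tbl => rowB arr k idx tbl :: tbl) [0])
        = (List.range' index (c + 1)).map (Fv arr k) := by
  intro c
  induction c with
  | zero =>
      intro index h
      have hidx : index = arr.length := by omega
      subst hidx
      simp [List.range'_one, Fv_len]
  | succ c ih =>
      intro index h
      have hcons : List.range' index (c + 1) = index :: List.range' (index + 1) c := by
        simp [List.range'_succ]
      rw [hcons]
      simp only [List.foldr_cons]
      rw [ih (index + 1) (by omega)]
      have hidx : index < arr.length := by omega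
      have hrow : rowB arr k index ((List.range' (index + 1) (c + 1)).map (Fv arr k))
          = Fv arr k index := by
        rw [rowB_eq, Fv_lt arr k index hidx]
        apply congrArg
        apply foldl_stepF_congr
        intro i hi
        have hb := mem_range'_bounds hi
        have hle := pvMB_le arr k index (by omega)
        have hin : i - index < c + 1 := by omega
        simp only [List.getD_eq_getElem?_getD, List.getElem?_map,
          List.getElem?_range' hin, Option.map_some, Option.getD_some, one_mul]
        congr 1
        omega
      rw [hrow]
      have : List.range' index (c + 1 + 1) = index :: List.range' (index + 1) (c + 1) := by
        simp [List.range'_succ]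
      rw [this]
      simp

lemma altB (arr : List Int) (k : Int) : partitionSum_alt arr k = Fv arr k 0 := by
  unfold partitionSum_alt
  rw [List.range_eq_range']
  rw [tableB arr k arr.length 0 (by omega)]
  have : List.range' 0 (arr.length + 1) = 0 :: List.range' 1 arr.length := by
    simp [List.range'_succ]
  rw [this]
  simp

-- ---------- A side ----------

def GoodA (arr : List Int) (k : Int) (dp : PySem.Dict Int Int) : Prop :=
  ∀ (j : Nat) (v : Int), PySem.Dict.get? dp (j : Int) = some v → v = Fv arr k j

-- the guarded pure step corresponding to A's inner loop on state (maxi, res)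
def pstep (arr : List Int) (k : Int) (index : Nat) (p : Int × Int) (i : Nat) : Int × Int :=
  if (i : Int) < (index : Int) + k then stepF arr index (fun j => Fv arr k (j + 1)) p i else p

lemma loopA_ok (arr : List Int) (k : Int) (fuel : Nat)
    (Hdfs : ∀ index dp, arr.length - index < fuel → index ≤ arr.length → GoodA arr k dp →
      (dfsA arr k fuel index dp).1 = Fv arr k index ∧ GoodA arr k (dfsA arr k fuel index dp).2) :
    ∀ (l : List Nat) (index : Nat) (maxi res : Int) (dp : PySem.Dict Int Int),
      (∀ i ∈ l, index ≤ i ∧ i < arr.length) → arr.length - index ≤ fuel → GoodA arr k dp →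
      ∃ dp', loopA arr k fuel index l maxi res dp
          = ((l.foldl (pstep arr k index) (maxi, res)).1,
             (l.foldl (pstep arr k index) (maxi, res)).2, dp') ∧ GoodA arr k dp' := by
  intro l
  induction l with
  | nil =>
      intro index maxi res dp _ _ hg
      exact ⟨dp, by simp [loopA], hg⟩
  | cons i rest ih =>
      intro index maxi res dp hb hf hg
      have hbi := hb i (by simp)
      by_cases hguard : (i : Int) < (index : Int) + k
      · have hdfs := Hdfs (i + 1) dp (by omega) (by omega) hg
        simp only [loopA, List.foldl_cons, pstep, if_pos hguard]
        rw [hdfs.1]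
        have := ih index
          (max maxi (arr.getD i 0))
          (max res (((i : Int) - (index : Int) + 1) * max maxi (arr.getD i 0) + Fv arr k (i + 1)))
          (dfsA arr k fuel (i + 1) dp).2
          (fun j hj => hb j (by simp [hj])) hf hdfs.2
        simpa [stepF] using this
      · simp only [loopA, List.foldl_cons, pstep, if_neg hguard]
        exact ih index maxi res dp (fun j hj => hb j (by simp [hj])) hf hg

-- guard is true on the truncated range, so pstep = stepF there
lemma foldl_pstep_true (arr : List Int) (k : Int) (index : Nat) :
    ∀ (l : List Nat) (p : Int × Int), (∀ i ∈ l, (i : Int) < (index : Int) + k) →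
      l.foldl (pstep arr k index) p = l.foldl (stepF arr index (fun j => Fv arr k (j + 1))) p := by
  intro l
  induction l with
  | nil => intro p _; rfl
  | cons a t ih =>
      intro p H
      simp only [List.foldl_cons, pstep, if_pos (H a (by simp))]
      exact ih _ (fun i hi => H i (by simp [hi]))

-- guard is false past the truncated range, so the state never changes
lemma foldl_pstep_false (arr : List Int) (k : Int) (index : Nat) :
    ∀ (l : List Nat) (p : Int × Int), (∀ i ∈ l, ¬ ((i : Int) < (index : Int) + k)) →
      l.foldl (pstep arr k index) p = p := by
  intro l
  induction l with
  | nil => intro p _; rfl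
  | cons a t ih =>
      intro p H
      simp only [List.foldl_cons, pstep, if_neg (H a (by simp))]
      exact ih _ (fun i hi => H i (by simp [hi]))

-- A's full-range guarded loop computes the truncated-range fold of the recurrence
lemma split_fold (arr : List Int) (k : Int) (index : Nat) (h : index < arr.length) :
    ((List.range' index (arr.length - index)).foldl (pstep arr k index) (-1, -1)).2
      = Fv arr k index := by
  have hle := pvMB_le arr k index (by omega)
  have hsplit : List.range' index (arr.length - index)
      = List.range' index (pvMB arr k index)
        ++ List.range' (index + pvMB arr k index) (arr.length - index - pvMB arr k index) := by
    have e1 : pvMB arr k index + (arr.length - index - pvMB arr k index)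
        = arr.length - index := by omega
    conv_lhs => rw [← e1]
    rw [← List.range'_append, one_mul]
  rw [hsplit, List.foldl_append]
  have hc := pvMB_cast arr k index
  rw [foldl_pstep_false arr k index
      (List.range' (index + pvMB arr k index) (arr.length - index - pvMB arr k index)) _ (by
    intro i hi
    obtain ⟨h1, h2⟩ := mem_range'_bounds hi
    omega)]
  rw [foldl_pstep_true arr k index (List.range' index (pvMB arr k index)) _ (by
    intro i hi
    obtain ⟨h1, h2⟩ := mem_range'_bounds hi
    omega)]
  rw [Fv_lt arr k index h]

lemma dfsA_ok (arr : List Int) (k : Int) :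
    ∀ fuel index dp, arr.length - index < fuel → index ≤ arr.length → GoodA arr k dp →
      (dfsA arr k fuel index dp).1 = Fv arr k index ∧ GoodA arr k (dfsA arr k fuel index dp).2 := by
  intro fuel
  induction fuel with
  | zero => intro index dp h _ _; omega
  | succ fuel ih =>
      intro index dp h hle hg
      by_cases hidx : index = arr.length
      · subst hidx
        simp only [dfsA, if_pos]
        exact ⟨(Fv_len arr k).symm, hg⟩
      · have hlt : index < arr.length := by omega
        simp only [dfsA, if_neg hidx]
        cases hget : PySem.Dict.get? dp (index : Int) with
        | some v =>
            simp only []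
            exact ⟨hg index v hget, hg⟩
        | none =>
            simp only []
            obtain ⟨dp', heq, hg'⟩ := loopA_ok arr k fuel ih
              (List.range' index (arr.length - index)) index (-1) (-1) dp
              (by intro i hi; have := mem_range'_bounds hi; omega)
              (by omega) hg
            rw [heq]
            constructor
            · exact split_fold arr k index hlt
            · intro j v hv
              rw [PySem.Dict.get?_insert] at hv
              split at hv
              · rename_i hj
                have hji : j = index := by exact_mod_cast hj
                simp only [] at hv
                cases hv
                rw [hji]
                exact split_fold arr k index hlt
              · exact hg' j v hv

-- ===== VERDICT (by name: the statement is the Claim_ definition above) =====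
theorem partitionSum_spec : Claim_equal_partitionSum := by
  intro arr k _
  unfold Spec_partitionSum partitionSum
  rw [altB arr k]
  exact (dfsA_ok arr k (arr.length + 1) 0 PySem.Dict.empty (by omega) (by omega)
    (by intro j v hv; simp [PySem.Dict.get?_empty] at hv)).1
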